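-- pv_equiv track=rewrite | github.com/vasujan/leetcode | 00_99/10_regular_expression/solution.py | firstRepeatingSubstring
-- ===== SOURCE A (Python) =====
-- def firstRepeatingSubstring(string: str, char: str) -> tuple[int, int]:
--     if len(char) != 1:
--         raise ValueError("Char should be one.")
--
--     found = False
--     i, found = 0, 0
--
--     for ci, c in enumerate(string):
--         if found and c != char:
--             break
--         if c == char:
--             if not found:
--                 i = ci
--             found += 1
--
--     return i, found
-- ===== SOURCE B (Python) =====
-- def firstRepeatingSubstring(string: str, char: str) -> tuple[int, int]:
--     if len(char) != 1:
--         raise ValueError("Char should be one.")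
--     start = string.find(char)
--     if start == -1:
--         return (0, 0)
--     n = 0
--     for c in string[start:]:
--         if c != char:
--             break
--         n += 1
--     return (start, n)
-- ===== Notes on version B (the rewrite author's own statement) =====
-- stated objective: simpler
-- what changed: Replaces A's single flag-driven enumerate pass (found counter doubling as boolean and counter) with a two-phase locate-then-measure shape: str.find locates the first occurrence, then a separate loop over the slice counts the run length.
import Mathlib
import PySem

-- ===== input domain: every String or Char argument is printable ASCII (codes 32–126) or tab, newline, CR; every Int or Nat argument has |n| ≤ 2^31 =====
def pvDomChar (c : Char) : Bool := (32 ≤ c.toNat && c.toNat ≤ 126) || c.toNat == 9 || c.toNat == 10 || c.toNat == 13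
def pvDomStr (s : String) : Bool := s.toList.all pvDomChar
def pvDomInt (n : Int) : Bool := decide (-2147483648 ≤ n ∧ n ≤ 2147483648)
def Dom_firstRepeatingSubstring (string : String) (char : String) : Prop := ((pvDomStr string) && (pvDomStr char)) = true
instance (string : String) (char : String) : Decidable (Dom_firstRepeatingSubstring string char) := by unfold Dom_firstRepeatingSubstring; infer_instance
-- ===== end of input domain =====

-- ===== PORT A =====
-- Loop state: i (start index), found (count, also used as boolean); break modelled by returning the state.
def pvLoopA (c : Char) : List (Int × Char) → Int → Int → Int × Int
  | [], i, found => (i, found)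
  | (ci, x) :: rest, i, found =>
    if found ≠ 0 ∧ x ≠ c then (i, found)
    else if x = c then
      pvLoopA c rest (if found = 0 then ci else i) (found + 1)
    else pvLoopA c rest i found

def firstRepeatingSubstring (string : String) (char : String) : Int × Int :=
  match char.toList with
  | [c] => pvLoopA c (PySem.List.enumerate string.toList 0) 0 0
  | _ => (0, 0)   -- len(char) != 1: Python raises ValueError; excluded by Pre_

-- ===== PORT B =====
-- n accumulates the run length; break modelled by returning n.
def pvRunLen (c : Char) (n : Int) : List Char → Int
  | [] => n
  | x :: rest => if x ≠ c then n else pvRunLen c (n + 1) rest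

def firstRepeatingSubstring_alt (string : String) (char : String) : Int × Int :=
  if char.toList.length ≠ 1 then (0, 0)   -- len(char) != 1: Python raises ValueError; excluded by Pre_
  else
    let c := char.toList.head!
    let start := PySem.Str.find string char
    if start = -1 then (0, 0)
    else (start, pvRunLen c 0 (PySem.List.slice string.toList (some start) none))

-- ===== PRECONDITION & SPEC =====
-- Pre_ excludes exactly the inputs where A raises ValueError (len(char) != 1).
def Pre_firstRepeatingSubstring (_string : String) (char : String) : Prop := char.toList.length = 1
instance (string : String) (char : String) : Decidable (Pre_firstRepeatingSubstring string char) := by unfold Pre_firstRepeatingSubstring; infer_instance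
def pvWitness_firstRepeatingSubstring : String × String := ("aabba", "b")
def Spec_firstRepeatingSubstring (string : String) (char : String) (out : Int × Int) : Prop := out = firstRepeatingSubstring_alt string char
instance (string : String) (char : String) (out : Int × Int) : Decidable (Spec_firstRepeatingSubstring string char out) := by unfold Spec_firstRepeatingSubstring; infer_instance

-- ===== CLAIM (what is proved, stated in full; the proofs are below) =====
def Claim_equal_firstRepeatingSubstring : Prop := ∀ (string : String) (char : String), Dom_firstRepeatingSubstring string char → Pre_firstRepeatingSubstring string char → Spec_firstRepeatingSubstring string char (firstRepeatingSubstring string char)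

-- ===== LEMMAS AND PROOFS =====

theorem pvRunLen_shift (c : Char) (n : Int) (l : List Char) :
    pvRunLen c n l = n + pvRunLen c 0 l := by
  induction l generalizing n with
  | nil => simp [pvRunLen]
  | cons x rest ih =>
    by_cases hx : x = c <;> simp [pvRunLen, hx]
    rw [ih (n+1), ih 1]; ring

theorem singleton_prefix_iff (c : Char) (l : List Char) :
    [c] <+: l ↔ l.head? = some c := by
  cases l with
  | nil => simp
  | cons x rest =>
    constructor
    · rintro ⟨t, ht⟩; simp_all
    · intro h; simp at h; exact ⟨rest, by simp [h]⟩

theorem singleton_infix_iff (c : Char) (l : List Char) :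
    [c] <:+: l ↔ c ∈ l := by
  constructor
  · intro h; exact h.mem (List.mem_singleton_self c)
  · intro h
    obtain ⟨s, t, rfl⟩ := List.append_of_mem h
    exact ⟨s, t, by simp⟩

-- recurrence for Python find on a single-character needle
theorem find_singleton_cons (c x : Char) (rest : List Char) :
    PySem.Chars.find (x :: rest) [c] =
      if x = c then 0
      else if PySem.Chars.find rest [c] = -1 then -1
      else PySem.Chars.find rest [c] + 1 := by
  by_cases hx : x = c
  · subst hx
    rw [if_pos rfl]
    have hin : [x] <:+: (x :: rest) := (singleton_infix_iff x _).mpr (by simp)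
    have hnn : 0 ≤ PySem.Chars.find (x :: rest) [x] := (PySem.Chars.find_nonneg_iff _ _).mpr hin
    obtain ⟨_, hmin⟩ := PySem.Chars.find_spec hnn
    by_contra hne
    have h0 : 0 < (PySem.Chars.find (x :: rest) [x]).toNat := by omega
    exact hmin 0 h0 ((singleton_prefix_iff x _).mpr (by simp))
  · simp only [if_neg hx]
    by_cases hr : PySem.Chars.find rest [c] = -1
    · simp only [if_pos hr]
      have hnotin : ¬ [c] <:+: rest := (PySem.Chars.find_eq_neg_one_iff _ _).mp hr
      apply (PySem.Chars.find_eq_neg_one_iff _ _).mpr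
      intro hcons
      have := (singleton_infix_iff c _).mp hcons
      simp at this
      exact hnotin ((singleton_infix_iff c _).mpr (by tauto))
    · simp only [if_neg hr]
      have hrn : 0 ≤ PySem.Chars.find rest [c] := by
        have := PySem.Chars.neg_one_le_find rest [c]; omega
      obtain ⟨hrp, hrmin⟩ := PySem.Chars.find_spec hrn
      have hin : [c] <:+: (x :: rest) := by
        have := (PySem.Chars.find_ne_neg_one_iff rest [c]).mp hr
        rw [singleton_infix_iff] at this ⊢; simp [this]
      have hnn : 0 ≤ PySem.Chars.find (x :: rest) [c] := (PySem.Chars.find_nonneg_iff _ _).mpr hin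
      obtain ⟨hp, hmin⟩ := PySem.Chars.find_spec hnn
      set f := PySem.Chars.find (x :: rest) [c] with hf
      set fr := PySem.Chars.find rest [c] with hfr
      have hfne : f.toNat ≠ 0 := by
        intro h0
        rw [h0] at hp
        rw [singleton_prefix_iff] at hp
        simp at hp; exact hx hp
      obtain ⟨m, hm⟩ : ∃ m, f.toNat = m + 1 := ⟨f.toNat - 1, by omega⟩
      have hpm : [c] <+: rest.drop m := by rw [hm] at hp; simpa using hp
      have h1 : fr.toNat ≤ m := by
        by_contra hlt
        exact hrmin m (by omega) hpm
      have h2 : f.toNat ≤ fr.toNat + 1 := by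
        by_contra hlt
        exact hmin (fr.toNat + 1) (by omega) (by simpa using hrp)
      omega

-- the common intermediate: locate-then-count as one recursion
def pvSpec (c : Char) (s i : Int) : List Char → Int × Int
  | [] => (i, 0)
  | x :: rest => if x = c then (s, 1 + pvRunLen c 0 rest) else pvSpec c (s + 1) i rest

-- A's counting phase
theorem loopA_count (c : Char) (l : List Char) :
    ∀ (s i found : Int), 0 < found →
    pvLoopA c (PySem.List.enumerate l s) i found = (i, found + pvRunLen c 0 l) := by
  induction l with
  | nil => intro s i found h; simp [pvLoopA, pvRunLen, PySem.List.enumerate_nil]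
  | cons x rest ih =>
    intro s i found h
    rw [PySem.List.enumerate_cons]
    by_cases hx : x = c
    · simp only [pvLoopA, hx, ne_eq, not_true_eq_false, and_false, if_false, if_neg (by omega : ¬ found = 0)]
      rw [ih (s+1) i (found+1) (by omega)]
      simp [pvRunLen, pvRunLen_shift c 1 rest]; ring_nf
    · rw [show pvLoopA c ((s, x) :: PySem.List.enumerate rest (s+1)) i found = (i, found) from by
        simp only [pvLoopA, if_pos (show found ≠ 0 ∧ x ≠ c from ⟨by omega, hx⟩)]]
      simp [pvRunLen, hx]

-- A's searching phase reaches pvSpec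
theorem loopA_spec (c : Char) (l : List Char) :
    ∀ (s i : Int), pvLoopA c (PySem.List.enumerate l s) i 0 = pvSpec c s i l := by
  induction l with
  | nil => intro s i; simp [pvLoopA, pvSpec, PySem.List.enumerate_nil]
  | cons x rest ih =>
    intro s i
    rw [PySem.List.enumerate_cons]
    by_cases hx : x = c
    · simp only [pvLoopA, pvSpec, hx, ne_eq, not_true_eq_false, and_false, if_false,
        if_true]
      rw [loopA_count c rest (s+1) s (0+1) (by omega)]
      norm_num
    · simp only [pvLoopA, pvSpec, hx, ne_eq, not_false_eq_true, and_true, if_false]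
      exact ih (s+1) i

-- B reaches pvSpec too
theorem pvSpec_find (c : Char) (l : List Char) :
    ∀ (s i : Int), pvSpec c s i l =
      if PySem.Chars.find l [c] = -1 then (i, 0)
      else (s + PySem.Chars.find l [c],
            pvRunLen c 0 (l.drop (PySem.Chars.find l [c]).toNat)) := by
  induction l with
  | nil =>
    intro s i
    have h : PySem.Chars.find ([] : List Char) [c] = -1 := by
      rw [PySem.Chars.find_eq_neg_one_iff]; simp
    simp [pvSpec, h]
  | cons x rest ih =>
    intro s i
    rw [find_singleton_cons]
    by_cases hx : x = c
    · simp [pvSpec, hx, pvRunLen, pvRunLen_shift c 1 rest]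
    · by_cases hr : PySem.Chars.find rest [c] = -1
      · simp [pvSpec, hx, hr, ih]
      · have hrn : 0 ≤ PySem.Chars.find rest [c] := by
          have := PySem.Chars.neg_one_le_find rest [c]; omega
        simp only [pvSpec, ih (s+1) i, if_neg hr, hx, if_false,
          if_neg (by omega : ¬ PySem.Chars.find rest [c] + 1 = -1)]
        have ht : (PySem.Chars.find rest [c] + 1).toNat = (PySem.Chars.find rest [c]).toNat + 1 := by omega
        rw [ht]
        simp only [List.drop_succ_cons]
        congr 1
        ring

-- ===== VERDICT (by name: the statement is the Claim_ definition above) =====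
theorem firstRepeatingSubstring_spec : Claim_equal_firstRepeatingSubstring := by
  intro string char _ hpre
  unfold Spec_firstRepeatingSubstring
  unfold Pre_firstRepeatingSubstring at hpre
  obtain ⟨c, hc⟩ : ∃ c, char.toList = [c] := by
    cases h : char.toList with
    | nil => rw [h] at hpre; simp at hpre
    | cons a t =>
      rw [h] at hpre; simp at hpre
      exact ⟨a, by rw [hpre]⟩
  have hA : firstRepeatingSubstring string char
      = pvLoopA c (PySem.List.enumerate string.toList 0) 0 0 := by
    unfold firstRepeatingSubstring; rw [hc]
  have hB : firstRepeatingSubstring_alt string char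
      = (let start := PySem.Str.find string char;
         if start = -1 then ((0:Int), (0:Int))
         else (start, pvRunLen c 0 (PySem.List.slice string.toList (some start) none))) := by
    unfold firstRepeatingSubstring_alt
    rw [if_neg (by rw [hc]; simp)]
    rw [show char.toList.head! = c from by rw [hc]; rfl]
  rw [hA, hB]
  have hfind : PySem.Str.find string char = PySem.Chars.find string.toList [c] := by
    rw [← hc]; simp
  simp only [hfind]
  rw [loopA_spec, pvSpec_find]
  by_cases h : PySem.Chars.find string.toList [c] = -1
  · simp [h]
  · have hnn : 0 ≤ PySem.Chars.find string.toList [c] := by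
      have := PySem.Chars.neg_one_le_find string.toList [c]; omega
    simp only [if_neg h, zero_add]
    rw [PySem.List.slice_from _ hnn]
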